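-- pv_equiv track=rewrite | github.com/riyanshibohra/OnsetLab | onsetlab/rewoo/planner.py | _find_similar_tools
-- ===== SOURCE A (Python) =====
-- from typing import List, Dict, Any, Optional
--
-- def _find_similar_tools(name: str, available: List[str], max_suggestions: int = 3) -> List[str]:
--     """Find similar tool names for helpful suggestions."""
--     name_lower = name.lower()
--     name_words = set(name_lower.replace('_', ' ').replace('-', ' ').split())
--
--     scored = []
--     for tool_name in available:
--         tool_lower = tool_name.lower()
--         tool_words = set(tool_lower.replace('_', ' ').replace('-', ' ').split())
--
--         # Score by word overlap
--         overlap = len(name_words & tool_words)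
--         if overlap > 0:
--             scored.append((tool_name, overlap))
--
--     # Sort by overlap descending
--     scored.sort(key=lambda x: x[1], reverse=True)
--
--     return [t[0] for t in scored[:max_suggestions]]
-- ===== SOURCE B (Python) =====
-- def _find_similar_tools(name, available, max_suggestions=3):
--     """Find similar tool names for helpful suggestions (bucket version)."""
--     name_words = set(name.lower().replace('_', ' ').replace('-', ' ').split())
--
--     # Bucket tools by their exact overlap count; lists keep scan order.
--     buckets = {}
--     for tool_name in available:
--         tool_words = set(tool_name.lower().replace('_', ' ').replace('-', ' ').split())
--         overlap = len(name_words & tool_words)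
--         if overlap > 0:
--             buckets.setdefault(overlap, []).append(tool_name)
--
--     # Overlap can never exceed len(name_words): walk buckets high -> low.
--     result = []
--     k = len(name_words)
--     while k > 0:
--         result.extend(buckets.get(k, []))
--         k -= 1
--     return result[:max_suggestions]
-- ===== Notes on version B (the rewrite author's own statement) =====
-- stated objective: alternative
-- what changed: Replaces the score-list-plus-stable-sort with a bucket dict keyed by overlap count, walked from the maximum possible overlap (len(name_words)) down to 1, slicing the full ordered list at the end.
import Mathlib
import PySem

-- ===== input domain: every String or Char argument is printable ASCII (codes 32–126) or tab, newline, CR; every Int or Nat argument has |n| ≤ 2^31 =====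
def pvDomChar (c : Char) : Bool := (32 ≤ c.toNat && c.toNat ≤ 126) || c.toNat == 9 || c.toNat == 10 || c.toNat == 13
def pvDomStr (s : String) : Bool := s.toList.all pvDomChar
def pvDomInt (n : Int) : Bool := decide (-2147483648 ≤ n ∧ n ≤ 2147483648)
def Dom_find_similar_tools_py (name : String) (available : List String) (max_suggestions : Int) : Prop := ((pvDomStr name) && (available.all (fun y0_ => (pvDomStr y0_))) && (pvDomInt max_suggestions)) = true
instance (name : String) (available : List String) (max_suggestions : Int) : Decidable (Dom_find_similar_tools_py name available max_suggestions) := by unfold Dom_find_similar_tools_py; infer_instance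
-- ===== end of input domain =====

-- B replaces A's stable sort of a scored list by overlap buckets walked from the
-- maximum possible overlap down to 1 (an alternative decomposition, no sort).

-- shared word-set computation: name.lower().replace('_',' ').replace('-',' ').split() as a set
def pvWords (s : String) : PySem.Set String :=
  PySem.Set.ofList (PySem.Str.split₀ (PySem.Str.replace (PySem.Str.replace (PySem.Str.lower s) "_" " ") "-" " "))

-- ===== PORT A =====
def find_similar_tools_py (name : String) (available : List String) (max_suggestions : Int) : List String :=
  let nameWords := pvWords name
  let scored : List (String × Int) := available.foldl (fun acc tool_name =>
    let overlap : Int := PySem.Set.len (PySem.Set.inter nameWords (pvWords tool_name))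
    if overlap > 0 then acc ++ [(tool_name, overlap)] else acc) []
  let sortedScored := PySem.List.sorted scored (fun p => p.2) true
  (PySem.List.slice sortedScored none (some max_suggestions)).map (fun t => t.1)

-- ===== PORT B =====
-- the while-loop 'k = len(name_words); while k > 0: result.extend(buckets.get(k, [])); k -= 1'
def pvCollect (buckets : PySem.Dict Int (List String)) : Nat → List String
  | 0 => []
  | k+1 => buckets.getD ((k+1 : Nat) : Int) [] ++ pvCollect buckets k

def find_similar_tools_py_alt (name : String) (available : List String) (max_suggestions : Int) : List String :=
  let nameWords := pvWords name
  let buckets := available.foldl (fun d tool_name =>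
    let overlap : Int := PySem.Set.len (PySem.Set.inter nameWords (pvWords tool_name))
    if overlap > 0 then d.modify overlap [] (fun l => l ++ [tool_name]) else d) (PySem.Dict.empty : PySem.Dict Int (List String))
  let result := pvCollect buckets (PySem.Set.len nameWords).toNat
  PySem.List.slice result none (some max_suggestions)

-- ===== PRECONDITION & SPEC =====
def Spec_find_similar_tools_py (name : String) (available : List String) (max_suggestions : Int) (out : List String) : Prop := out = find_similar_tools_py_alt name available max_suggestions
instance (name : String) (available : List String) (max_suggestions : Int) (out : List String) : Decidable (Spec_find_similar_tools_py name available max_suggestions out) := by unfold Spec_find_similar_tools_py; infer_instance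

-- ===== CLAIM (what is proved, stated in full; the proofs are below) =====
def Claim_equal_find_similar_tools_py : Prop := ∀ (name : String) (available : List String) (max_suggestions : Int), Dom_find_similar_tools_py name available max_suggestions → Spec_find_similar_tools_py name available max_suggestions (find_similar_tools_py name available max_suggestions)

-- ===== LEMMAS AND PROOFS =====

-- descending bucket concatenation of l by key: buckets k, k-1, …, 1
def pvDesc {α : Type} (l : List α) (key : α → Int) : Nat → List α
  | 0 => []
  | k+1 => l.filter (fun a => key a == (k : Int) + 1) ++ pvDesc l key k

theorem pvDesc_nil {α : Type} (key : α → Int) (n : Nat) : pvDesc [] key n = [] := by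
  induction n with
  | zero => rfl
  | succ k ih => simp [pvDesc, ih]

theorem pvMem_desc_le {α : Type} {l : List α} {key : α → Int} {n : Nat} {b : α}
    (h : b ∈ pvDesc l key n) : key b ≤ (n : Int) := by
  induction n with
  | zero => simp [pvDesc] at h
  | succ k ih =>
    simp only [pvDesc, List.mem_append, List.mem_filter] at h
    rcases h with ⟨_, h⟩ | h
    · simp only [beq_iff_eq] at h; omega
    · have := ih h; push_cast; omega

theorem pvInsertBy_not_before {α : Type} (bef : α → α → Bool) (x : α) (A B : List α)
    (hA : ∀ a ∈ A, bef x a = false) :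
    PySem.List.insertBy bef x (A ++ B) = A ++ PySem.List.insertBy bef x B := by
  induction A with
  | nil => rfl
  | cons a A ih =>
    have ha : bef x a = false := hA a (by simp)
    simp only [List.cons_append, PySem.List.insertBy, ha]
    simp [ih (fun a ha' => hA a (by simp [ha']))]

theorem pvInsertBy_head {α : Type} (bef : α → α → Bool) (x : α) (B : List α)
    (hB : ∀ b ∈ B, bef x b = true) :
    PySem.List.insertBy bef x B = x :: B := by
  cases B with
  | nil => rfl
  | cons b B => simp [PySem.List.insertBy, hB b (by simp)]

theorem pvDesc_append_high {α : Type} (l : List α) (key : α → Int) (x : α) (k : Nat)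
    (hx : (k : Int) < key x) : pvDesc (l ++ [x]) key k = pvDesc l key k := by
  induction k with
  | zero => rfl
  | succ j ih =>
    have hj : ((j : Int) : Int) < key x := by push_cast at hx ⊢; omega
    simp only [pvDesc, List.filter_append, ih hj]
    have : (key x == (j : Int) + 1) = false := by
      simp only [beq_eq_false_iff_ne, ne_eq]; push_cast at hx ⊢; omega
    simp [this]

theorem pvInsert_desc {α : Type} (l : List α) (key : α → Int) (x : α) (N : Nat)
    (h1 : 1 ≤ key x) (h2 : key x ≤ (N : Int)) :
    PySem.List.insertBy (fun a b => decide (key b < key a)) x (pvDesc l key N)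
      = pvDesc (l ++ [x]) key N := by
  induction N with
  | zero => exfalso; push_cast at h2; omega
  | succ k ih =>
    by_cases hk : key x = (k : Int) + 1
    · -- x lands at the end of bucket k+1
      have hfx : (key x == (k : Int) + 1) = true := by simp [hk]
      have step1 : PySem.List.insertBy (fun a b => decide (key b < key a)) x
          (l.filter (fun a => key a == (k : Int) + 1) ++ pvDesc l key k)
          = l.filter (fun a => key a == (k : Int) + 1) ++
            PySem.List.insertBy (fun a b => decide (key b < key a)) x (pvDesc l key k) := by
        apply pvInsertBy_not_before
        intro a ha
        have : key a = (k : Int) + 1 := by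
          have := (List.mem_filter.mp ha).2; simpa using this
        simp [this, hk]
      have step2 : PySem.List.insertBy (fun a b => decide (key b < key a)) x (pvDesc l key k)
          = x :: pvDesc l key k := by
        apply pvInsertBy_head
        intro b hb
        have := pvMem_desc_le hb
        simp only [decide_eq_true_eq]; push_cast at hk; omega
      have hhigh : pvDesc (l ++ [x]) key k = pvDesc l key k :=
        pvDesc_append_high l key x k (by omega)
      simp only [pvDesc, step1, step2, List.filter_append, hhigh]
      simp [hfx]
    · -- key x ≤ k : recurse into the lower buckets
      have hle : key x ≤ (k : Int) := by push_cast at h2 ⊢; omega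
      have hfx : (key x == (k : Int) + 1) = false := by
        simp only [beq_eq_false_iff_ne, ne_eq]; exact hk
      have step1 : PySem.List.insertBy (fun a b => decide (key b < key a)) x
          (l.filter (fun a => key a == (k : Int) + 1) ++ pvDesc l key k)
          = l.filter (fun a => key a == (k : Int) + 1) ++
            PySem.List.insertBy (fun a b => decide (key b < key a)) x (pvDesc l key k) := by
        apply pvInsertBy_not_before
        intro a ha
        have : key a = (k : Int) + 1 := by
          have := (List.mem_filter.mp ha).2; simpa using this
        simp only [decide_eq_false_iff_not, not_lt, this]
        push_cast at hle ⊢; omega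
      simp only [pvDesc, step1, ih hle, List.filter_append]
      simp [hfx]

-- stable reverse sort by an Int key with all keys in [1, N] is the descending bucket concat
theorem pvSorted_eq_desc {α : Type} (l : List α) (key : α → Int) (N : Nat)
    (h : ∀ a ∈ l, 1 ≤ key a ∧ key a ≤ (N : Int)) :
    PySem.List.sorted l key true = pvDesc l key N := by
  induction l using List.reverseRecOn with
  | nil => simp [PySem.List.sorted, pvDesc_nil]
  | append_singleton l x ih =>
    have hx := h x (by simp)
    have hl : ∀ a ∈ l, 1 ≤ key a ∧ key a ≤ (N : Int) := fun a ha => h a (by simp [ha])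
    rw [PySem.List.sorted_rev_eq_foldl_insertBy, List.foldl_append,
        ← PySem.List.sorted_rev_eq_foldl_insertBy, ih hl]
    simpa using pvInsert_desc l key x N hx.1 hx.2

theorem pvSlice_to_map {α β : Type} (f : α → β) (xs : List α) (m : Int) :
    PySem.List.slice (xs.map f) none (some m) = (PySem.List.slice xs none (some m)).map f := by
  by_cases hm : 0 ≤ m
  · rw [PySem.List.slice_to _ hm, PySem.List.slice_to _ hm, List.map_take]
  · have hk : 0 < (-m).toNat := by omega
    have hme : m = -(((-m).toNat : Nat) : Int) := by omega
    rw [hme, PySem.List.slice_to_neg_natCast _ _ hk, PySem.List.slice_to_neg_natCast _ _ hk,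
        List.length_map, List.map_take]

-- filter of a mapped list, pushed through the map
theorem pvDesc_map {α β : Type} (l : List α) (f : α → β) (key : α → Int) (keyB : β → Int)
    (hk : ∀ a, keyB (f a) = key a) (n : Nat) :
    pvDesc (l.map f) keyB n = (pvDesc l key n).map f := by
  induction n with
  | zero => rfl
  | succ k ih =>
    simp only [pvDesc, ih, List.map_append]
    rw [List.filter_map]
    simp only [Function.comp_def, hk]

theorem pvOv_bound (nW tw : List String)
    (h : 0 < PySem.Set.len (PySem.Set.inter nW tw)) :
    1 ≤ PySem.Set.len (PySem.Set.inter nW tw) ∧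
      PySem.Set.len (PySem.Set.inter nW tw) ≤ (((PySem.Set.len nW).toNat : Nat) : Int) := by
  have h2 : (PySem.Set.inter nW tw).length ≤ nW.length := List.length_filter_le _ _
  simp only [PySem.Set.len] at *
  constructor
  · omega
  · omega

theorem pvCollect_eq (pairs : List (Int × String)) (n : Nat) :
    pvCollect (List.foldl (fun d p => d.modify p.1 [] (fun l => l ++ [p.2]))
      (PySem.Dict.empty : PySem.Dict Int (List String)) pairs) n
      = (pvDesc pairs (fun p => p.1) n).map (fun p => p.2) := by
  induction n with
  | zero => rfl
  | succ k ih =>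
    simp only [pvCollect, pvDesc, List.map_append, ih]
    congr 1
    rw [PySem.Dict.getD_foldl_modify_append]
    simp [PySem.Dict.empty, PySem.Dict.getD, PySem.Dict.get?]

set_option maxHeartbeats 1000000 in
theorem pvB_side (ov : String → Int) (l : List String) (N : Nat) :
    pvCollect (List.foldl (fun d t => d.modify (ov t) [] (fun l => l ++ [t]))
      (PySem.Dict.empty : PySem.Dict Int (List String)) l) N = pvDesc l ov N := by
  have h : List.foldl (fun d t => d.modify (ov t) [] (fun l => l ++ [t]))
      (PySem.Dict.empty : PySem.Dict Int (List String)) l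
      = List.foldl (fun d p => d.modify p.1 [] (fun l => l ++ [p.2]))
        (PySem.Dict.empty : PySem.Dict Int (List String)) (l.map (fun t => (ov t, t))) := by
    rw [List.foldl_map]
  rw [h, pvCollect_eq, pvDesc_map l (fun t => (ov t, t)) ov (fun p => p.1) (fun a => rfl) N]
  simp [Function.comp_def]

theorem pvMapFst (f : String → Int) (xs : List String) :
    (xs.map (fun t => (t, f t))).map (fun p => (p : String × Int).1) = xs := by
  simp [Function.comp_def]

theorem find_similar_tools_py_spec : Claim_equal_find_similar_tools_py := by
  intro name available max_suggestions _
  unfold Spec_find_similar_tools_py find_similar_tools_py find_similar_tools_py_alt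
  simp only
  rw [PySem.List.foldl_append_ite
        (fun t => PySem.Set.len (PySem.Set.inter (pvWords name) (pvWords t)) > 0)
        (fun t => (t, PySem.Set.len (PySem.Set.inter (pvWords name) (pvWords t))))]
  rw [PySem.List.foldl_ite_eq_foldl_filter
        (fun t => PySem.Set.len (PySem.Set.inter (pvWords name) (pvWords t)) > 0)
        (fun (d : PySem.Dict Int (List String)) t =>
          d.modify (PySem.Set.len (PySem.Set.inter (pvWords name) (pvWords t))) []
          (fun l => l ++ [t]))]
  set ov : String → Int := fun t => PySem.Set.len (PySem.Set.inter (pvWords name) (pvWords t)) with hov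
  set l : List String := available.filter (fun t => decide (ov t > 0)) with hl
  set N : Nat := (PySem.Set.len (pvWords name)).toNat with hN
  have hbounds : ∀ p ∈ l.map (fun t => (t, ov t)), 1 ≤ p.2 ∧ p.2 ≤ (N : Int) := by
    intro p hp
    rcases List.mem_map.mp hp with ⟨t, ht, rfl⟩
    rw [hl] at ht
    have h1' : 0 < ov t := by simpa using (List.mem_filter.mp ht).2
    exact pvOv_bound (pvWords name) (pvWords t) h1'
  rw [List.nil_append, pvSorted_eq_desc _ _ N hbounds,
      pvDesc_map l (fun t => (t, ov t)) ov (fun p => p.2) (fun a => rfl) N,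
      pvSlice_to_map]
  rw [pvB_side (fun t => PySem.Set.len (PySem.Set.inter (pvWords name) (pvWords t))) l N,
      pvMapFst ov, hov]
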